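-- pv_equiv track=rewrite | github.com/DailyMok/ComfyUI-dAIly | prompt_mixer.py | _match_column
-- ===== SOURCE A (Python) =====
-- def _norm(s: str) -> str:
--     return (s or "").strip().lower().replace("_", " ").replace("-", " ")
--
-- CSV_COLUMN_ALIASES = {
--     "skin": ["skin"],
--     "bodytype": ["bodytype", "body type", "body"],
--     "hairstyle": ["hairstyle", "hair style", "haircut"],
--     "haircolor": ["haircolor", "hair color", "hair colour"],
--     "eyes": ["eyes", "eye", "eyes color", "eye color"],
--     "clothes": ["clothes", "outfit", "clothing"],
--     "expression": ["expression", "facial expression", "mood"],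
--     "pose": ["pose", "poses", "posture", "stance"],
--     "locate": ["locate", "location", "place", "background", "scene", "setting"],
--     "lightsource": ["light source", "lighting source", "main light", "key light", "light"],
--     "lightingtype": ["lighting type", "light type", "illumination type"],
--     "shotsize": ["shot size", "shot", "frame size"],
--     "composition": ["composition", "framing", "frame composition", "rule of thirds", "balance"],
--     "focallength": ["focal length", "focal", "lens length", "mm"],
--     "cameraangle": ["camera angle", "angle", "view angle"],
--     "lenstype": ["lens type", "lens", "prime", "zoom"],
--     "color": ["color", "colortone", "colour tone", "color grading", "tone", "grading"],
--     "effect": ["effect", "effects", "fx", "vfx"],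
--     "extra1": ["extra1", "extra 1", "bonus1"],
--     "extra2": ["extra2", "extra 2", "bonus2"],
--     "extra3": ["extra3", "extra 3", "bonus3"],
--     "accessories": ["accessories", "accessory", "props", "items"],
-- }
--
-- def _match_column(header_names, wanted_key):
--     wanted = _norm(wanted_key)
--     aliases = CSV_COLUMN_ALIASES.get(wanted, [wanted])
--     normalized_headers = {h: _norm(h) for h in header_names}
--
--     alias_norm = {_norm(a) for a in aliases}
--     for h, hn in normalized_headers.items():
--         if hn in alias_norm:
--             return h
--
--     head = wanted.split()[0] if wanted else ""
--     for h, hn in normalized_headers.items():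
--         if head and hn.startswith(head):
--             return h
--
--     for h, hn in normalized_headers.items():
--         if any(tok and tok in hn for tok in alias_norm):
--             return h
--
--     return None
-- ===== SOURCE B (Python) =====
-- def _norm(s: str) -> str:
--     return (s or "").strip().lower().replace("_", " ").replace("-", " ")
--
-- CSV_COLUMN_ALIASES = {
--     "skin": ["skin"],
--     "bodytype": ["bodytype", "body type", "body"],
--     "hairstyle": ["hairstyle", "hair style", "haircut"],
--     "haircolor": ["haircolor", "hair color", "hair colour"],
--     "eyes": ["eyes", "eye", "eyes color", "eye color"],
--     "clothes": ["clothes", "outfit", "clothing"],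
--     "expression": ["expression", "facial expression", "mood"],
--     "pose": ["pose", "poses", "posture", "stance"],
--     "locate": ["locate", "location", "place", "background", "scene", "setting"],
--     "lightsource": ["light source", "lighting source", "main light", "key light", "light"],
--     "lightingtype": ["lighting type", "light type", "illumination type"],
--     "shotsize": ["shot size", "shot", "frame size"],
--     "composition": ["composition", "framing", "frame composition", "rule of thirds", "balance"],
--     "focallength": ["focal length", "focal", "lens length", "mm"],
--     "cameraangle": ["camera angle", "angle", "view angle"],
--     "lenstype": ["lens type", "lens", "prime", "zoom"],
--     "color": ["color", "colortone", "colour tone", "color grading", "tone", "grading"],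
--     "effect": ["effect", "effects", "fx", "vfx"],
--     "extra1": ["extra1", "extra 1", "bonus1"],
--     "extra2": ["extra2", "extra 2", "bonus2"],
--     "extra3": ["extra3", "extra 3", "bonus3"],
--     "accessories": ["accessories", "accessory", "props", "items"],
-- }
--
-- def _match_column(header_names, wanted_key):
--     # One priority-tracking pass instead of three sequential scans over a
--     # normalized-headers dict: rank 0 = exact alias match, 1 = prefix of the
--     # head token, 2 = alias token substring; keep the earliest, lowest-ranked.
--     wanted = _norm(wanted_key)
--     aliases = CSV_COLUMN_ALIASES.get(wanted, [wanted])
--     alias_norm = {_norm(a) for a in aliases}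
--     head = (wanted.split() or [""])[0]
--     best = None  # (rank, header)
--     for h in header_names:
--         hn = _norm(h)
--         if hn in alias_norm:
--             rank = 0
--         elif head and hn.startswith(head):
--             rank = 1
--         elif any(tok and tok in hn for tok in alias_norm):
--             rank = 2
--         else:
--             continue
--         if best is None or rank < best[0]:
--             best = (rank, h)
--             if rank == 0:
--                 break
--     return best[1] if best is not None else None
-- ===== Notes on version B (the rewrite author's own statement) =====
-- stated objective: alternative
-- what changed: B replaces A's normalized-headers dict plus three sequential scans (exact alias, head-prefix, alias-token substring) by a single priority-tracking pass over the header list that keeps the earliest header of the lowest match rank (with early exit on an exact match), relying on the fact that duplicate headers and the dict's first-occurrence order cannot change the result.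
-- crash fix: On keys whose normalized form is non-empty but whitespace-only (e.g. '_' or '-'), when no header normalizes to the empty string, A raises IndexError at wanted.split()[0]; B returns None. — e.g. on _match_column(["pose"], "_"): A raises IndexError, B returns none
import Mathlib
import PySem

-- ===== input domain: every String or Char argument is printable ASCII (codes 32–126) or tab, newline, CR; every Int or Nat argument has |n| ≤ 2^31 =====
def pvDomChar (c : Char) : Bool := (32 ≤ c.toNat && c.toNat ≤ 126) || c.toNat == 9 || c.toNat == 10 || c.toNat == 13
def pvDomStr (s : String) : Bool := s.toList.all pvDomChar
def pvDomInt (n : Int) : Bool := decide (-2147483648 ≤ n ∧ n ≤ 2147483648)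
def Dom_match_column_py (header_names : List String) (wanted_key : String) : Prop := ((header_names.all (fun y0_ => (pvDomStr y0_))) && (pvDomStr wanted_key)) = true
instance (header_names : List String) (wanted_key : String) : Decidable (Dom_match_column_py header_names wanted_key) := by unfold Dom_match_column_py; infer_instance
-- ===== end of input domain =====

-- B replaces A's three sequential scans over a normalized-headers dict by one
-- priority-tracking pass over the header list (alternative decomposition, same cost class).

-- shared module context: _norm and CSV_COLUMN_ALIASES (identical in both Pythons)
def pyNorm (s : String) : String :=
  PySem.Str.replace (PySem.Str.replace (PySem.Str.lower (PySem.Str.strip s)) "_" " ") "-" " "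

def csvColumnAliases : PySem.Dict String (List String) :=
  PySem.Dict.ofList [
    ("skin", ["skin"]),
    ("bodytype", ["bodytype", "body type", "body"]),
    ("hairstyle", ["hairstyle", "hair style", "haircut"]),
    ("haircolor", ["haircolor", "hair color", "hair colour"]),
    ("eyes", ["eyes", "eye", "eyes color", "eye color"]),
    ("clothes", ["clothes", "outfit", "clothing"]),
    ("expression", ["expression", "facial expression", "mood"]),
    ("pose", ["pose", "poses", "posture", "stance"]),
    ("locate", ["locate", "location", "place", "background", "scene", "setting"]),
    ("lightsource", ["light source", "lighting source", "main light", "key light", "light"]),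
    ("lightingtype", ["lighting type", "light type", "illumination type"]),
    ("shotsize", ["shot size", "shot", "frame size"]),
    ("composition", ["composition", "framing", "frame composition", "rule of thirds", "balance"]),
    ("focallength", ["focal length", "focal", "lens length", "mm"]),
    ("cameraangle", ["camera angle", "angle", "view angle"]),
    ("lenstype", ["lens type", "lens", "prime", "zoom"]),
    ("color", ["color", "colortone", "colour tone", "color grading", "tone", "grading"]),
    ("effect", ["effect", "effects", "fx", "vfx"]),
    ("extra1", ["extra1", "extra 1", "bonus1"]),
    ("extra2", ["extra2", "extra 2", "bonus2"]),
    ("extra3", ["extra3", "extra 3", "bonus3"]),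
    ("accessories", ["accessories", "accessory", "props", "items"])]

-- ===== PORT A =====
def match_column_py (header_names : List String) (wanted_key : String) : Option String :=
  let wanted := pyNorm wanted_key
  let aliases := (csvColumnAliases.get? wanted).getD [wanted]
  let normalizedHeaders : PySem.Dict String String :=
    header_names.foldl (fun d h => d.insert h (pyNorm h)) PySem.Dict.empty
  let aliasNorm : PySem.Set String := PySem.Set.ofList (aliases.map pyNorm)
  match normalizedHeaders.items.find? (fun p => PySem.Set.contains aliasNorm p.2) with
  | some p => some p.1
  | none =>
    -- head = wanted.split()[0] if wanted else ""   (pyGetD under Pre_: outside Pre_ Python raises IndexError here)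
    let head := if wanted = "" then "" else PySem.List.pyGetD (PySem.Str.split₀ wanted) 0 ""
    match normalizedHeaders.items.find? (fun p => (head != "") && PySem.Str.startswith p.2 head) with
    | some p => some p.1
    | none =>
      match normalizedHeaders.items.find? (fun p => aliasNorm.any (fun tok => (tok != "") && PySem.Str.isIn tok p.2)) with
      | some p => some p.1
      | none => none

-- ===== PORT B =====
-- the single pass: best = earliest header of the lowest rank (0 exact, 1 prefix, 2 substring)
def altLoop (aliasNorm : PySem.Set String) (head : String) :
    List String → Option (Nat × String) → Option (Nat × String)
  | [], best => best
  | h :: rest, best =>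
    let hn := pyNorm h
    let rank? : Option Nat :=
      if PySem.Set.contains aliasNorm hn then some 0
      else if (head != "") && PySem.Str.startswith hn head then some 1
      else if aliasNorm.any (fun tok => (tok != "") && PySem.Str.isIn tok hn) then some 2
      else none
    match rank? with
    | none => altLoop aliasNorm head rest best
    | some r =>
      let best' := match best with
        | none => some (r, h)
        | some (br, bh) => if r < br then some (r, h) else some (br, bh)
      if r = 0 then best' else altLoop aliasNorm head rest best'

def match_column_py_alt (header_names : List String) (wanted_key : String) : Option String :=
  let wanted := pyNorm wanted_key
  let aliases := (csvColumnAliases.get? wanted).getD [wanted]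
  let aliasNorm : PySem.Set String := PySem.Set.ofList (aliases.map pyNorm)
  let head := (PySem.Str.split₀ wanted).headD ""   -- (wanted.split() or [""])[0]
  (altLoop aliasNorm head header_names none).map (·.2)

-- ===== PRECONDITION & SPEC =====
-- A raises IndexError exactly when the normalized key is non-empty but splits into no words
-- (key made only of whitespace/'_'/'-') and no header normalizes to "" ; B returns None there.
def Raises_match_column_py (header_names : List String) (wanted_key : String) : Prop :=
  pyNorm wanted_key ≠ "" ∧ PySem.Str.split₀ (pyNorm wanted_key) = [] ∧
    header_names.all (fun h => pyNorm h != "") = true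
instance (header_names : List String) (wanted_key : String) : Decidable (Raises_match_column_py header_names wanted_key) := by unfold Raises_match_column_py; infer_instance

-- Pre_ excludes exactly the inputs on which A raises IndexError (the Raises_ region above).
def Pre_match_column_py (header_names : List String) (wanted_key : String) : Prop :=
  ¬ Raises_match_column_py header_names wanted_key
instance (header_names : List String) (wanted_key : String) : Decidable (Pre_match_column_py header_names wanted_key) := by unfold Pre_match_column_py; infer_instance

def pvWitness_match_column_py : List String × String := (["Hair Color", "Pose"], "hair_color")
def pvRaiseWitness_match_column_py : List String × String := (["pose"], "_")
def pvRaiseWitnessOut_match_column_py : Option String := none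

def Spec_match_column_py (header_names : List String) (wanted_key : String) (out : Option String) : Prop := out = match_column_py_alt header_names wanted_key
instance (header_names : List String) (wanted_key : String) (out : Option String) : Decidable (Spec_match_column_py header_names wanted_key out) := by unfold Spec_match_column_py; infer_instance

-- ===== CLAIM (what is proved, stated in full; the proofs are below) =====
def Claim_equal_match_column_py : Prop := ∀ (header_names : List String) (wanted_key : String), Dom_match_column_py header_names wanted_key → Pre_match_column_py header_names wanted_key → Spec_match_column_py header_names wanted_key (match_column_py header_names wanted_key)
def Claim_raises_match_column_py : Prop := (∀ (header_names : List String) (wanted_key : String), Dom_match_column_py header_names wanted_key → Raises_match_column_py header_names wanted_key → ¬ Pre_match_column_py header_names wanted_key) ∧ (Dom_match_column_py (pvRaiseWitness_match_column_py.1) (pvRaiseWitness_match_column_py.2) ∧ Raises_match_column_py (pvRaiseWitness_match_column_py.1) (pvRaiseWitness_match_column_py.2) ∧ match_column_py_alt (pvRaiseWitness_match_column_py.1) (pvRaiseWitness_match_column_py.2) = pvRaiseWitnessOut_match_column_py)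

-- ===== LEMMAS AND PROOFS =====

-- generic rank / best-combine / selection, abstracted over the three predicates
def gCombine : Option (Nat × String) → Option (Nat × String) → Option (Nat × String)
  | none, y => y
  | some b, none => some b
  | some (br, bh), some (r, h) => if r < br then some (r, h) else some (br, bh)

def gRank (p0 p1 p2 : String → Bool) (h : String) : Option Nat :=
  if p0 h then some 0 else if p1 h then some 1 else if p2 h then some 2 else none

def gSel (p0 p1 p2 : String → Bool) : List String → Option (Nat × String)
  | [] => none
  | h :: t => gCombine ((gRank p0 p1 p2 h).map (fun r => (r, h))) (gSel p0 p1 p2 t)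

def gSelSpec (p0 p1 p2 : String → Bool) (l : List String) : Option (Nat × String) :=
  match l.find? p0 with
  | some h => some (0, h)
  | none => match l.find? p1 with
    | some h => some (1, h)
    | none => (l.find? p2).map (fun h => (2, h))

-- the three predicates and derived data of the concrete programs
def pvP0 (aN : PySem.Set String) (h : String) : Bool := PySem.Set.contains aN (pyNorm h)
def pvP1 (head : String) (h : String) : Bool := (head != "") && PySem.Str.startswith (pyNorm h) head
def pvP2 (aN : PySem.Set String) (h : String) : Bool :=
  aN.any (fun tok => (tok != "") && PySem.Str.isIn tok (pyNorm h))
def pvAN (wk : String) : PySem.Set String :=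
  PySem.Set.ofList (((csvColumnAliases.get? (pyNorm wk)).getD [pyNorm wk]).map pyNorm)
def pvHead (wk : String) : String := (PySem.Str.split₀ (pyNorm wk)).headD ""

theorem gCombine_none_right (x : Option (Nat × String)) : gCombine x none = x := by
  cases x <;> rfl

theorem gCombine_zero (h : String) (x : Option (Nat × String)) :
    gCombine (some (0, h)) x = some (0, h) := by
  rcases x with _ | ⟨r, h'⟩ <;> simp [gCombine]

theorem gCombine_assoc (a b c : Option (Nat × String)) :
    gCombine (gCombine a b) c = gCombine a (gCombine b c) := by
  rcases a with _ | ⟨ar, ah⟩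
  · rfl
  rcases b with _ | ⟨br, bh⟩
  · rfl
  rcases c with _ | ⟨cr, ch⟩
  · rw [gCombine_none_right, gCombine_none_right]
  · by_cases h1 : br < ar <;> by_cases h2 : cr < br <;> by_cases h3 : cr < ar <;>
      simp [gCombine, h1, h2, h3] <;> omega

theorem altLoop_cons (aN : PySem.Set String) (head : String) (h : String) (t : List String)
    (b : Option (Nat × String)) :
    altLoop aN head (h :: t) b =
      match gRank (pvP0 aN) (pvP1 head) (pvP2 aN) h with
      | none => altLoop aN head t b
      | some r => if r = 0 then gCombine b (some (r, h))
                  else altLoop aN head t (gCombine b (some (r, h))) := by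
  cases b <;> rfl

theorem altLoop_eq (aN : PySem.Set String) (head : String) :
    ∀ (l : List String) (b : Option (Nat × String)),
      altLoop aN head l b = gCombine b (gSel (pvP0 aN) (pvP1 head) (pvP2 aN) l) := by
  intro l
  induction l with
  | nil => intro b; cases b <;> rfl
  | cons h t ih =>
    intro b
    rw [altLoop_cons]
    rcases hR : gRank (pvP0 aN) (pvP1 head) (pvP2 aN) h with _ | r <;> dsimp only
    · simp [gSel, hR, ih b, gCombine]
    · by_cases h0 : r = 0
      · subst h0
        simp [gSel, hR, gCombine_zero]
      · rw [if_neg h0, ih, gCombine_assoc]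
        simp [gSel, hR, gCombine]

theorem gSel_eq_spec (p0 p1 p2 : String → Bool) (l : List String) :
    gSel p0 p1 p2 l = gSelSpec p0 p1 p2 l := by
  induction l with
  | nil => rfl
  | cons h t ih =>
    rw [gSel, ih]
    by_cases h0 : p0 h <;> by_cases h1 : p1 h <;> by_cases h2 : p2 h <;>
      rcases hf0 : t.find? p0 with _ | y0 <;> rcases hf1 : t.find? p1 with _ | y1 <;>
      rcases hf2 : t.find? p2 with _ | y2 <;>
      simp [gRank, gSelSpec, gCombine, List.find?_cons, h0, h1, h2, hf0, hf1, hf2]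

-- A's normalized_headers dict holds (dedup of the headers) paired with their norms
theorem items_foldl_insert :
    ∀ (xs s : List String),
      (xs.foldl (fun d h => d.insert h (pyNorm h))
          (PySem.Dict.mk (s.map (fun h => (h, pyNorm h))))).items
        = (xs.foldl PySem.Set.add s).map (fun h => (h, pyNorm h)) := by
  intro xs
  induction xs with
  | nil => intro s; rfl
  | cons x t ih =>
    intro s
    simp only [List.foldl_cons]
    have hcont : (PySem.Dict.mk (s.map (fun h => (h, pyNorm h)))).contains x = s.contains x := by
      simp [PySem.Dict.contains, List.any_map, Function.comp_def, List.any_beq']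
    by_cases hx : s.contains x = true
    · have hm : x ∈ s := List.mem_of_elem_eq_true hx
      have hins : (PySem.Dict.mk (s.map (fun h => (h, pyNorm h)))).insert x (pyNorm x)
          = PySem.Dict.mk (s.map (fun h => (h, pyNorm h))) := by
        simp only [PySem.Dict.insert, hcont, hx, if_pos]
        congr 1
        rw [List.map_map]
        apply List.map_congr_left
        intro a _
        by_cases hax : (a == x) = true
        · have hax' : a = x := eq_of_beq hax
          simp [Function.comp, hax, hax']
        · simp [Function.comp, hax]
      rw [hins, show PySem.Set.add s x = s by simp [PySem.Set.add, hm]]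
      exact ih s
    · have hm : x ∉ s := fun m => hx (List.elem_eq_true_of_mem m)
      have hins : (PySem.Dict.mk (s.map (fun h => (h, pyNorm h)))).insert x (pyNorm x)
          = PySem.Dict.mk ((s ++ [x]).map (fun h => (h, pyNorm h))) := by
        simp [PySem.Dict.insert, hcont, hm]
      rw [hins, show PySem.Set.add s x = s ++ [x] by simp [PySem.Set.add, hm]]
      exact ih (s ++ [x])

-- find? sees only first occurrences, so deduplication does not change it
theorem find?_foldl_add_of_some (p : String → Bool) :
    ∀ (xs s : List String) (y : String), s.find? p = some y →
      (xs.foldl PySem.Set.add s).find? p = some y := by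
  intro xs
  induction xs with
  | nil => intro s y hy; exact hy
  | cons x t ih =>
    intro s y hy
    simp only [List.foldl_cons]
    apply ih
    unfold PySem.Set.add
    split
    · exact hy
    · rw [List.find?_append, hy]; rfl

theorem find?_foldl_add (p : String → Bool) :
    ∀ (xs s : List String), (∀ x ∈ s, p x = false) →
      (xs.foldl PySem.Set.add s).find? p = xs.find? p := by
  intro xs
  induction xs with
  | nil =>
    intro s hs
    exact List.find?_eq_none.mpr (fun x hx => by simp [hs x hx])
  | cons x t ih =>
    intro s hs
    simp only [List.foldl_cons]
    by_cases hx : PySem.Set.contains s x = true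
    · rw [show PySem.Set.add s x = s by unfold PySem.Set.add; rw [if_pos hx]]
      have hpx : p x = false := hs x (List.mem_of_elem_eq_true hx)
      rw [ih s hs, List.find?_cons, hpx]
    · rw [show PySem.Set.add s x = s ++ [x] by unfold PySem.Set.add; rw [if_neg hx]]
      by_cases hpx : p x = true
      · have hfind : (s ++ [x]).find? p = some x := by
          rw [List.find?_append, List.find?_eq_none.mpr (fun z hz => by simp [hs z hz])]
          simp [List.find?_cons, hpx]
        rw [find?_foldl_add_of_some p t (s ++ [x]) x hfind, List.find?_cons, hpx]
      · have hpx' : p x = false := by simpa using hpx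
        rw [ih (s ++ [x]) ?_, List.find?_cons, hpx']
        intro z hz
        rcases List.mem_append.mp hz with h | h
        · exact hs z h
        · simp at h; subst h; exact hpx'

theorem find?_dedup (p : String → Bool) (xs : List String) :
    (PySem.Set.ofList xs).find? p = xs.find? p := by
  rw [PySem.Set.ofList_eq_foldl]
  exact find?_foldl_add p xs [] (by simp)

theorem heads_eq (w : String) :
    (if w = "" then "" else PySem.List.pyGetD (PySem.Str.split₀ w) 0 "") =
      (PySem.Str.split₀ w).headD "" := by
  by_cases hw : w = ""
  · subst hw; rfl
  · rw [if_neg hw, PySem.List.pyGetD_zero]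
    cases PySem.Str.split₀ w <;> rfl

theorem alt_eq_spec (hs : List String) (wk : String) :
    match_column_py_alt hs wk =
      (gSelSpec (pvP0 (pvAN wk)) (pvP1 (pvHead wk)) (pvP2 (pvAN wk)) hs).map (·.2) := by
  show (altLoop (pvAN wk) (pvHead wk) hs none).map (·.2) = _
  rw [altLoop_eq, gSel_eq_spec]
  rfl

theorem a_core (aN : PySem.Set String) (head : String) (l : List String) :
    (match (l.map (fun h => (h, pyNorm h))).find? (fun p => PySem.Set.contains aN p.2) with
      | some p => some p.1
      | none =>
        match (l.map (fun h => (h, pyNorm h))).find?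
            (fun p => (head != "") && PySem.Str.startswith p.2 head) with
        | some p => some p.1
        | none =>
          match (l.map (fun h => (h, pyNorm h))).find?
              (fun p => aN.any (fun tok => (tok != "") && PySem.Str.isIn tok p.2)) with
          | some p => some p.1
          | none => none)
      = (gSelSpec (pvP0 aN) (pvP1 head) (pvP2 aN) l).map (·.2) := by
  have e0 : ((fun p : String × String => PySem.Set.contains aN p.2) ∘
      (fun h : String => (h, pyNorm h))) = pvP0 aN := by funext h; rfl
  have e1 : ((fun p : String × String => (head != "") && PySem.Str.startswith p.2 head) ∘
      (fun h : String => (h, pyNorm h))) = pvP1 head := by funext h; rfl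
  have e2 : ((fun p : String × String => aN.any (fun tok => (tok != "") && PySem.Str.isIn tok p.2)) ∘
      (fun h : String => (h, pyNorm h))) = pvP2 aN := by funext h; rfl
  rw [List.find?_map, List.find?_map, List.find?_map, e0, e1, e2]
  unfold gSelSpec
  rcases hf0 : l.find? (pvP0 aN) with _ | y0 <;>
    rcases hf1 : l.find? (pvP1 head) with _ | y1 <;>
    rcases hf2 : l.find? (pvP2 aN) with _ | y2 <;>
    simp [hf0, hf1, hf2]

theorem a_eq_spec (hs : List String) (wk : String) :
    match_column_py hs wk =
      (gSelSpec (pvP0 (pvAN wk)) (pvP1 (pvHead wk)) (pvP2 (pvAN wk))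
        (PySem.Set.ofList hs)).map (·.2) := by
  have hitems : (hs.foldl (fun d h => d.insert h (pyNorm h)) PySem.Dict.empty).items
      = (PySem.Set.ofList hs).map (fun h => (h, pyNorm h)) := by
    rw [PySem.Set.ofList_eq_foldl]
    exact items_foldl_insert hs []
  simp only [match_column_py]
  rw [hitems, heads_eq]
  exact a_core (pvAN wk) (pvHead wk) (PySem.Set.ofList hs)

theorem ports_agree (header_names : List String) (wanted_key : String) :
    match_column_py header_names wanted_key = match_column_py_alt header_names wanted_key := by
  rw [a_eq_spec, alt_eq_spec]
  unfold gSelSpec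
  rw [find?_dedup, find?_dedup, find?_dedup]

-- ===== VERDICT (by name: the statement is the Claim_ definition above) =====
theorem match_column_py_spec : Claim_equal_match_column_py := by
  intro hs wk _ _
  unfold Spec_match_column_py
  exact ports_agree hs wk

@[simp]
theorem match_column_py_raises : Claim_raises_match_column_py := by
  unfold Claim_raises_match_column_py
  exact ⟨fun _ _ _ hr hp => hp hr, by decide⟩
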